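-- pv_equiv track=rewrite | github.com/www-norma-dev/Levelapp | level-core/simluators/utils.py | summarize_justifications
-- ===== SOURCE A (Python) =====
-- from typing import Dict, Any, Optional, List
-- from collections import defaultdict
--
-- def summarize_justifications(justifications: List[Dict[str, str]], max_bullets: int = 5) -> List[str]:
--     """
--     Summarizes the justifications for each judge.
--
--     Args:
--         justifications (List[Dict[str, str]]): List of justification dictionaries with 'justification' and 'scenario'.
--         max_bullets (int, optional): Maximum number of summarized justifications to return. Defaults to 5.
--
--     Returns:
--         List[str]: List of summarized justifications, grouped by justification text.
--     """
--     # Placeholder: implement your own summarization logic or LLM call here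
--     grouped = defaultdict(list)
--     for item in justifications:
--         grouped[item["justification"].strip()].append(item["scenario"])
--     merged_justifications = [
--         f"{justification} (Scenarios: {', '.join(scenarios)})"
--         for justification, scenarios in grouped.items()
--     ]
--     # Return up to max_bullets merged justifications
--     return merged_justifications[:max_bullets]
-- ===== SOURCE B (Python) =====
-- def summarize_justifications(justifications, max_bullets=5):
--     # First pass: distinct stripped justification texts in first-seen order.
--     seen = set()
--     order = []
--     for item in justifications:
--         t = item["justification"].strip()
--         if t not in seen:
--             seen.add(t)
--             order.append(t)
--     # For each distinct text, re-scan the full list collecting its scenarios in order.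
--     bullets = []
--     for t in order:
--         scenarios = [it["scenario"] for it in justifications if it["justification"].strip() == t]
--         bullets.append(f"{t} (Scenarios: {', '.join(scenarios)})")
--     return bullets[:max_bullets]
-- ===== Notes on version B (the rewrite author's own statement) =====
-- stated objective: alternative
-- what changed: B keeps no dict: one seen-set pass collects the distinct stripped justification texts in first-seen order, then for each distinct text the full list is re-scanned to collect its scenarios in order, formatted and truncated to max_bullets.
-- outside the precondition, e.g. on summarize_justifications([{'scenario': 's1'}], 5): A raises KeyError, B raises KeyError
import Mathlib
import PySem

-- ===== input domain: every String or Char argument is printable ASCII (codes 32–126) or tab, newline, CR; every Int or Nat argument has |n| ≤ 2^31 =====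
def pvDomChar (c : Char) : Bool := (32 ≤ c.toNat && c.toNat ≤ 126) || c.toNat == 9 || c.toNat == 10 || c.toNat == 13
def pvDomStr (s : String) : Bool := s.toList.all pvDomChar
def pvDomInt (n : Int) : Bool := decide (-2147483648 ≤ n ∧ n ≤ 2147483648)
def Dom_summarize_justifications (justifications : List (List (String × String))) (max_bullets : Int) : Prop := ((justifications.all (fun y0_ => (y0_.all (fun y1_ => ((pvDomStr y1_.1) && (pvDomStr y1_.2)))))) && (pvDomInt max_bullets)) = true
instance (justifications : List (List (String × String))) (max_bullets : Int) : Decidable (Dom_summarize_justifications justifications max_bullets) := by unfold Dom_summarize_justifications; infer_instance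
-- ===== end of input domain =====

-- B replaces A's defaultdict grouping by an ordered seen-set pass plus a re-scan of the whole
-- list per distinct justification text (objective: alternative decomposition, no dict kept).

-- item[k]: first-match lookup in the association list; the "" default is never used on
-- Pre_-admitted inputs (a missing key is a Python KeyError, excluded by Pre_).
def pvGetItem (it : List (String × String)) (k : String) : String :=
  (PySem.Dict.mk it).getD k ""

-- f"{justification} (Scenarios: {', '.join(scenarios)})"
def pvFmt (p : String × List String) : String :=
  p.1 ++ " (Scenarios: " ++ PySem.Str.join ", " p.2 ++ ")"

-- ===== PORT A =====
-- grouped = defaultdict(list); for item: grouped[item["justification"].strip()].append(item["scenario"])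
def pvAGrouped (justifications : List (List (String × String))) : PySem.Dict String (List String) :=
  justifications.foldl
    (fun d it => d.modify (PySem.Str.strip (pvGetItem it "justification")) []
      (· ++ [pvGetItem it "scenario"]))
    PySem.Dict.empty

def summarize_justifications (justifications : List (List (String × String))) (max_bullets : Int) : List String :=
  PySem.List.slice ((pvAGrouped justifications).items.map (fun p => pvFmt (p.1, p.2)))
    none (some max_bullets)

-- ===== PORT B =====
-- first pass: seen-set plus first-seen order of the distinct stripped texts
def pvBFirstPass (justifications : List (List (String × String))) : PySem.Set String × List String :=
  justifications.foldl
    (fun (st : PySem.Set String × List String) it =>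
      let t := PySem.Str.strip (pvGetItem it "justification")
      if PySem.Set.contains st.1 t then st else (PySem.Set.add st.1 t, st.2 ++ [t]))
    (PySem.Set.empty, [])

-- second pass, per distinct text t: re-scan the full list collecting its scenarios in order
def pvBScenarios (justifications : List (List (String × String))) (t : String) : List String :=
  (justifications.filter
      (fun it => PySem.Str.strip (pvGetItem it "justification") == t)).map
    (fun it => pvGetItem it "scenario")

def summarize_justifications_alt (justifications : List (List (String × String))) (max_bullets : Int) : List String :=
  PySem.List.slice
    ((pvBFirstPass justifications).2.map (fun t => pvFmt (t, pvBScenarios justifications t)))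
    none (some max_bullets)

-- ===== PRECONDITION & SPEC =====
-- Pre_ excludes exactly the items missing a "justification" or "scenario" key, on which the
-- Python A raises KeyError.
def Pre_summarize_justifications (justifications : List (List (String × String))) (max_bullets : Int) : Prop :=
  ∀ it ∈ justifications,
    ((PySem.Dict.mk it).get? "justification").isSome ∧ ((PySem.Dict.mk it).get? "scenario").isSome
instance (justifications : List (List (String × String))) (max_bullets : Int) : Decidable (Pre_summarize_justifications justifications max_bullets) := by unfold Pre_summarize_justifications; infer_instance

def pvWitness_summarize_justifications : (List (List (String × String))) × Int :=
  ([[("justification", " a "), ("scenario", "s1")], [("justification", "a"), ("scenario", "s2")]], 5)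

def Spec_summarize_justifications (justifications : List (List (String × String))) (max_bullets : Int) (out : List String) : Prop := out = summarize_justifications_alt justifications max_bullets
instance (justifications : List (List (String × String))) (max_bullets : Int) (out : List String) : Decidable (Spec_summarize_justifications justifications max_bullets out) := by unfold Spec_summarize_justifications; infer_instance

-- ===== CLAIM (what is proved, stated in full; the proofs are below) =====
def Claim_equal_summarize_justifications : Prop := ∀ (justifications : List (List (String × String))) (max_bullets : Int), Dom_summarize_justifications justifications max_bullets → Pre_summarize_justifications justifications max_bullets → Spec_summarize_justifications justifications max_bullets (summarize_justifications justifications max_bullets)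

-- ===== LEMMAS AND PROOFS =====

-- the stripped key of an item, shorthand for the proofs
def pvKey (it : List (String × String)) : String := PySem.Str.strip (pvGetItem it "justification")
def pvVal (it : List (String × String)) : String := pvGetItem it "scenario"

-- with equal state components, B's first-pass step adds the key to both components
theorem pvB_step (s : PySem.Set String) (it : List (String × String)) :
    (if PySem.Set.contains s (pvKey it) then (s, s)
     else (PySem.Set.add s (pvKey it), s ++ [pvKey it]))
      = (PySem.Set.add s (pvKey it), PySem.Set.add s (pvKey it)) := by
  by_cases h : pvKey it ∈ s <;> simp [PySem.Set.add, h]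

-- B's first pass computes Set.update of the stripped keys, in both components
theorem pvB_pass1 (l : List (List (String × String))) (s : PySem.Set String) :
    (l.foldl (fun (st : PySem.Set String × List String) it =>
        let t := PySem.Str.strip (pvGetItem it "justification")
        if PySem.Set.contains st.1 t then st else (PySem.Set.add st.1 t, st.2 ++ [t])) (s, s))
      = (PySem.Set.update s (l.map pvKey), PySem.Set.update s (l.map pvKey)) := by
  induction l generalizing s with
  | nil => simp [PySem.Set.update]
  | cons it l ih =>
      have h1 : ∀ st : PySem.Set String × List String,
          (let t := PySem.Str.strip (pvGetItem it "justification")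
           if PySem.Set.contains st.1 t then st else (PySem.Set.add st.1 t, st.2 ++ [t]))
            = (if PySem.Set.contains st.1 (pvKey it) then st
               else (PySem.Set.add st.1 (pvKey it), st.2 ++ [pvKey it])) := by
        intro st; rfl
      rw [List.foldl_cons, h1 (s, s), pvB_step, ih, List.map_cons, PySem.Set.update_cons]

-- ===== VERDICT =====
theorem summarize_justifications_spec : Claim_equal_summarize_justifications := by
  intro justs m _ _
  unfold Spec_summarize_justifications summarize_justifications summarize_justifications_alt
  congr 1
  -- A's fold over items as a fold over (key, value) pairs
  have hfold : pvAGrouped justs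
      = (justs.map (fun it => (pvKey it, pvVal it))).foldl
          (fun d p => d.modify p.1 [] (· ++ [p.2])) PySem.Dict.empty := by
    unfold pvAGrouped
    rw [List.foldl_map]
    rfl
  set pairs := justs.map (fun it => (pvKey it, pvVal it)) with hpairs
  have hnodup : (pvAGrouped justs).keys.Nodup := by
    rw [hfold]
    exact PySem.Dict.nodup_keys_foldl_modify_key pairs (fun p => p.1)
      ([] : List String) (fun _ p => (· ++ [p.2])) PySem.Dict.empty
      (by simp)
  have hkeys : (pvAGrouped justs).keys = PySem.Set.update PySem.Set.empty (justs.map pvKey) := by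
    rw [hfold]
    have := PySem.Dict.keys_foldl_modify_key pairs (fun p => p.1)
      ([] : List String) (fun _ p => (· ++ [p.2])) PySem.Dict.empty
    rw [this]
    simp [PySem.Dict.keys_empty, PySem.Set.empty, hpairs, List.map_map, Function.comp_def]
  have hitems : (pvAGrouped justs).items
      = (pvAGrouped justs).keys.map (fun k => (k, (pvAGrouped justs).getD k [])) :=
    PySem.Dict.items_eq_map_keys (pvAGrouped justs) hnodup []
  have hpass1 : pvBFirstPass justs
      = (PySem.Set.update PySem.Set.empty (justs.map pvKey),
         PySem.Set.update PySem.Set.empty (justs.map pvKey)) := by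
    unfold pvBFirstPass
    exact pvB_pass1 justs PySem.Set.empty
  rw [hitems, hkeys, hpass1, List.map_map]
  apply List.map_congr_left
  intro t _
  have hval : (pvAGrouped justs).getD t [] = (pairs.filter (fun p => p.1 == t)).map (·.2) := by
    rw [hfold]
    have := PySem.Dict.getD_foldl_modify_append pairs PySem.Dict.empty t
    simpa [PySem.Dict.getD_empty] using this
  simp only [Function.comp_def, hval, hpairs, List.filter_map, List.map_map]
  rfl
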